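-- pv_equiv track=rewrite | github.com/pharesim/propolis-wiki | updater.py | formatPostLinkSegment
-- ===== SOURCE A (Python) =====
-- def formatPostLinkSegment(segment):
--     split = segment.split(':')
--     if(len(split) > 1):
--         segment = ''
--         for i, s in enumerate(split):
--             segment += formatPostLinkSegment(s)
--             if(i+1 < len(split)):
--                 segment += ':'
--         return segment
--     keeplow = ['Disambiguation','disambiguation']
--     if(segment not in keeplow):
--         return segment.capitalize()
--     if(segment in keeplow):
--         return segment.lower()
--     return segment
-- ===== SOURCE B (Python) =====
-- def _transform(part):
--     if part in ('Disambiguation', 'disambiguation'):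
--         return part.lower()
--     return part.capitalize()
--
--
-- def formatPostLinkSegment(segment):
--     # Single left-to-right character scan: collect each colon-delimited piece
--     # into a buffer, flush it through the per-piece transform, and join.
--     parts = []
--     buf = []
--     for ch in segment:
--         if ch == ':':
--             parts.append(_transform(''.join(buf)))
--             buf = []
--         else:
--             buf.append(ch)
--     parts.append(_transform(''.join(buf)))
--     return ':'.join(parts)
-- ===== Notes on version B (the rewrite author's own statement) =====
-- stated objective: alternative
-- what changed: Replaces A's self-recursion over the colon-split pieces with a non-recursive single left-to-right character scan that buffers each colon-delimited piece, transforms it (lower for the disambiguation special case, capitalize otherwise) and joins the results.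
import Mathlib
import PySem

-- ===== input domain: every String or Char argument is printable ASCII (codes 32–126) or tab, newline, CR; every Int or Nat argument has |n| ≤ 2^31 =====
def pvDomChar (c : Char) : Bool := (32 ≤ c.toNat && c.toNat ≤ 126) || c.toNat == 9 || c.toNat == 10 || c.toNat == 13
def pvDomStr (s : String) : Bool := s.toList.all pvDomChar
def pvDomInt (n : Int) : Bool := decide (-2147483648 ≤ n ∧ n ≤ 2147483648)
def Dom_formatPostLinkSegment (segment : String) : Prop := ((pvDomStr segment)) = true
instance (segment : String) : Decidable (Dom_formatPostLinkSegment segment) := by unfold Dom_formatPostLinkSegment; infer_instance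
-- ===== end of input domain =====

-- B replaces A's self-recursion over split(':') with a non-recursive single
-- character scan that buffers each piece, transforms it and joins; equivalence
-- is proved for all strings (both functions are total).

-- keeplow = ['Disambiguation','disambiguation'] (shared literal of both Pythons)
def keeplow : List (List Char) := ["Disambiguation".toList, "disambiguation".toList]

-- str.capitalize(): first char uppercased, rest lowered (exact on the ASCII domain,
-- where Python's titlecase of the first char coincides with upper)
def pyCapitalize (cs : List Char) : List Char :=
  match cs with
  | [] => []
  | c :: rest => PySem.Chars.upperChar c :: PySem.Chars.lower rest

-- ===== PORT A =====
-- fuel = recursion depth bound (recursive calls are on colon-free pieces, so depth ≤ 2;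
-- fuel makes the same recursion total and is never exhausted on a reachable call)
def formatPostLinkSegmentGo : Nat → List Char → List Char
  | 0, seg => seg
  | fuel+1, seg =>
    let split := PySem.Chars.splitOn seg [':']
    if 1 < split.length then
      (PySem.List.enumerate split 0).foldl
        (fun acc p =>
          let acc := acc ++ formatPostLinkSegmentGo fuel p.2
          if p.1 + 1 < (split.length : Int) then acc ++ [':'] else acc) []
    else
      if seg ∉ keeplow then pyCapitalize seg
      else if seg ∈ keeplow then PySem.Chars.lower seg
      else seg

def formatPostLinkSegment (segment : String) : String :=
  String.ofList (formatPostLinkSegmentGo (segment.toList.length + 1) segment.toList)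

-- ===== PORT B =====
def transformPiece (cs : List Char) : List Char :=
  if cs ∈ keeplow then PySem.Chars.lower cs else pyCapitalize cs

def formatPostLinkSegment_alt (segment : String) : String :=
  let st := segment.toList.foldl
    (fun (st : List (List Char) × List Char) ch =>
      if ch = ':' then (st.1 ++ [transformPiece st.2], ([] : List Char))
      else (st.1, st.2 ++ [ch]))
    ([], [])
  String.ofList (PySem.Chars.join [':'] (st.1 ++ [transformPiece st.2]))

-- ===== PRECONDITION & SPEC =====
def Spec_formatPostLinkSegment (segment : String) (out : String) : Prop := out = formatPostLinkSegment_alt segment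
instance (segment : String) (out : String) : Decidable (Spec_formatPostLinkSegment segment out) := by unfold Spec_formatPostLinkSegment; infer_instance

-- ===== CLAIM (what is proved, stated in full; the proofs are below) =====
def Claim_equal_formatPostLinkSegment : Prop := ∀ (segment : String), Dom_formatPostLinkSegment segment → Spec_formatPostLinkSegment segment (formatPostLinkSegment segment)

-- ===== LEMMAS AND PROOFS =====

-- clean structural model of s.split(':')
def splitC : List Char → List (List Char)
  | [] => [[]]
  | c :: rest => if c = ':' then [] :: splitC rest else (splitC rest).modifyHead (c :: ·)

theorem splitC_ne_nil (s : List Char) : splitC s ≠ [] := by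
  induction s with
  | nil => simp [splitC]
  | cons c rest ih =>
    simp only [splitC]
    split_ifs
    · simp
    · cases h : splitC rest with
      | nil => exact absurd h ih
      | cons a t => simp [List.modifyHead]

theorem splitOn_go_colon (fuel : Nat) (l cur : List Char) (acc : List (List Char))
    (h : l.length < fuel) :
    PySem.Chars.splitOn.go [':'] fuel l cur acc
      = acc.reverse ++ (splitC l).modifyHead (cur.reverse ++ ·) := by
  induction fuel generalizing l cur acc with
  | zero => omega
  | succ fuel ih =>
    cases l with
    | nil => simp [PySem.Chars.splitOn.go, splitC, List.modifyHead]
    | cons c rest =>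
      simp only [PySem.Chars.splitOn.go]
      by_cases hc : c = ':'
      · subst hc
        have hp : List.isPrefixOf [':'] (':' :: rest) = true := by
          simp [List.isPrefixOf]
        rw [if_pos hp]
        have := ih rest [] (cur.reverse :: acc) (by simpa using Nat.lt_of_succ_lt_succ h)
        simp only [List.length_cons, List.length_nil, List.drop_succ_cons, List.drop_zero] at this ⊢
        rw [this]
        simp only [splitC, List.reverse_cons, List.append_assoc,
          List.singleton_append, List.reverse_nil, List.modifyHead]
        cases splitC rest <;> simp
      · have hp : List.isPrefixOf [':'] (c :: rest) = false := by
          have hcc : (':' == c) = false := by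
            simpa [beq_eq_false_iff_ne] using fun h' => hc h'.symm
          simp [List.isPrefixOf, hcc]
        rw [if_neg (by simp [hp])]
        have := ih rest (c :: cur) acc (by simpa using Nat.lt_of_succ_lt_succ h)
        rw [this]
        have hne := splitC_ne_nil rest
        cases hsp : splitC rest with
        | nil => exact absurd hsp hne
        | cons a t => simp [splitC, hc, hsp, List.modifyHead]

theorem splitOn_colon (s : List Char) : PySem.Chars.splitOn s [':'] = splitC s := by
  have := splitOn_go_colon (s.length + 1) s [] [] (by omega)
  simp only [PySem.Chars.splitOn]
  rw [this]
  cases h : splitC s with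
  | nil => exact absurd h (splitC_ne_nil s)
  | cons a t => simp [List.modifyHead]

theorem colon_not_mem_splitC (s : List Char) : ∀ p ∈ splitC s, ':' ∉ p := by
  induction s with
  | nil => simp [splitC]
  | cons c rest ih =>
    simp only [splitC]
    split_ifs with hc
    · intro p hp
      rcases List.mem_cons.1 hp with h | h
      · subst h; simp
      · exact ih p h
    · cases hsp : splitC rest with
      | nil => exact absurd hsp (splitC_ne_nil rest)
      | cons a t =>
        intro p hp
        simp only [List.modifyHead] at hp
        rcases List.mem_cons.1 hp with h | h
        · subst h
          intro hmem
          rcases List.mem_cons.1 hmem with h' | h'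
          · exact hc h'.symm
          · exact ih a (by simp [hsp]) h'
        · exact ih p (by simp [hsp, h])

theorem splitC_no_colon (s : List Char) (h : ':' ∉ s) : splitC s = [s] := by
  induction s with
  | nil => simp [splitC]
  | cons c rest ih =>
    have hc : c ≠ ':' := fun hc => h (by simp [hc])
    have hr : ':' ∉ rest := fun hr => h (by simp [hr])
    simp [splitC, hc, ih hr, List.modifyHead]

theorem splitC_colon_len (s : List Char) (h : ':' ∈ s) : 1 < (splitC s).length := by
  induction s with
  | nil => simp at h
  | cons c rest ih =>
    simp only [splitC]
    split_ifs with hc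
    · have := splitC_ne_nil rest
      cases hsp : splitC rest with
      | nil => exact absurd hsp this
      | cons a t => simp
    · have hr : ':' ∈ rest := by
        rcases List.mem_cons.1 h with h' | h'
        · exact absurd h'.symm hc
        · exact h'
      cases hsp : splitC rest with
      | nil => exact absurd hsp (splitC_ne_nil rest)
      | cons a t =>
        have := ih hr
        simp [hsp, List.modifyHead] at this ⊢
        omega

-- A's base-case branch chain equals transformPiece
theorem base_eq_transform (s : List Char) :
    (if s ∉ keeplow then pyCapitalize s
     else if s ∈ keeplow then PySem.Chars.lower s else s) = transformPiece s := by
  by_cases h : s ∈ keeplow <;> simp [transformPiece, h]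

-- B's fold characterized via splitC
theorem foldB_eq (cs : List Char) (parts : List (List Char)) (buf : List Char) :
    (let st := cs.foldl
      (fun (st : List (List Char) × List Char) ch =>
        if ch = ':' then (st.1 ++ [transformPiece st.2], ([] : List Char))
        else (st.1, st.2 ++ [ch]))
      (parts, buf)
     st.1 ++ [transformPiece st.2])
    = parts ++ ((splitC cs).modifyHead (buf ++ ·)).map transformPiece := by
  induction cs generalizing parts buf with
  | nil => simp [splitC, List.modifyHead]
  | cons c rest ih =>
    simp only [List.foldl_cons]
    by_cases hc : c = ':'
    · subst hc
      rw [if_pos rfl]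
      have := ih (parts ++ [transformPiece buf]) []
      simp only [this]
      cases hsp : splitC rest with
      | nil => exact absurd hsp (splitC_ne_nil rest)
      | cons a t => simp [splitC, hsp, List.modifyHead]
    · rw [if_neg hc]
      have := ih parts (buf ++ [c])
      simp only [this]
      cases hsp : splitC rest with
      | nil => exact absurd hsp (splitC_ne_nil rest)
      | cons a t => simp [splitC, hc, hsp, List.modifyHead]

-- A's separator-appending fold over enumerate is a join
theorem foldA_join (f : List Char → List Char) (N : Nat) :
    ∀ (L : List (List Char)) (i : Nat) (acc : List Char), L ≠ [] → i + L.length = N →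
    (PySem.List.enumerate L (i : Int)).foldl
      (fun acc p =>
        if p.1 + 1 < (N : Int) then acc ++ f p.2 ++ [':'] else acc ++ f p.2) acc
      = acc ++ PySem.Chars.join [':'] (L.map f) := by
  intro L
  induction L with
  | nil => intro i acc h; exact absurd rfl h
  | cons x t ih =>
    intro i acc _ hN
    simp only [PySem.List.enumerate_cons, List.foldl_cons]
    by_cases ht : t = []
    · subst ht
      simp only [PySem.List.enumerate_nil, List.foldl_nil]
      have : ¬ ((i : Int) + 1 < (N : Int)) := by
        simp only [List.length_cons, List.length_nil] at hN; omega
      rw [if_neg this]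
      simp [PySem.Chars.join_singleton]
    · have hlt : ((i : Int) + 1 < (N : Int)) := by
        have := List.length_pos_of_ne_nil ht
        simp only [List.length_cons] at hN; omega
      rw [if_pos hlt]
      have hrec := ih (i + 1) (acc ++ f x ++ [':']) ht
        (by simp only [List.length_cons] at hN ⊢; omega)
      push_cast at hrec
      rw [hrec]
      obtain ⟨y, t', rfl⟩ := List.exists_cons_of_ne_nil ht
      simp [PySem.Chars.join_cons_cons, List.append_assoc]

-- colon-free pieces take A's base case (any positive fuel)
theorem goA_piece (fuel : Nat) (p : List Char) (h : ':' ∉ p) :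
    formatPostLinkSegmentGo (fuel + 1) p = transformPiece p := by
  simp only [formatPostLinkSegmentGo, splitOn_colon, splitC_no_colon p h]
  rw [if_neg (by simp)]
  exact base_eq_transform p

-- ===== VERDICT (by name: the statement is the Claim_ definition above) =====
theorem formatPostLinkSegment_spec : Claim_equal_formatPostLinkSegment := by
  intro segment _
  simp only [Spec_formatPostLinkSegment, formatPostLinkSegment, formatPostLinkSegment_alt]
  have hB := foldB_eq segment.toList [] []
  have hBsplit : (splitC segment.toList).modifyHead (([] : List Char) ++ ·)
      = splitC segment.toList := by
    cases hsp : splitC segment.toList with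
    | nil => exact absurd hsp (splitC_ne_nil _)
    | cons a t => simp [List.modifyHead]
  rw [hBsplit] at hB
  simp only [List.nil_append] at hB
  rw [hB]
  by_cases hc : ':' ∈ segment.toList
  · -- at least one colon: A takes the joining branch
    obtain ⟨m, hm⟩ : ∃ m, segment.toList.length = m + 1 := by
      cases hl : segment.toList with
      | nil => rw [hl] at hc; simp at hc
      | cons a t => exact ⟨t.length, by simp⟩
    rw [hm]
    rw [formatPostLinkSegmentGo]
    simp only [splitOn_colon]
    rw [if_pos (splitC_colon_len segment.toList hc)]
    have hjoin := foldA_join (formatPostLinkSegmentGo (m + 1))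
      (splitC segment.toList).length (splitC segment.toList) 0 []
      (splitC_ne_nil _) (by simp)
    simp only [Nat.cast_zero, List.nil_append] at hjoin
    rw [hjoin]
    have hmap : (splitC segment.toList).map (formatPostLinkSegmentGo (m + 1))
        = (splitC segment.toList).map transformPiece := by
      apply List.map_congr_left
      intro p hp
      exact goA_piece m p (colon_not_mem_splitC segment.toList p hp)
    rw [hmap]
  · -- no colon: base case on both sides
    rw [goA_piece segment.toList.length segment.toList hc]
    rw [splitC_no_colon segment.toList hc]
    simp [PySem.Chars.join_singleton]
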